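-- pv_equiv track=rewrite | github.com/alsmolka/sentence-alignment | utils.py | _final_filter
-- ===== SOURCE A (Python) =====
-- def _final_filter(sentence_pair):
--     if len(sentence_pair[0].split())>22 or len(sentence_pair[1].split())>22:
--         return False
--     if sentence_pair[0].lower() in sentence_pair[1].lower() or sentence_pair[1].lower() in sentence_pair[0].lower():
--         return False
--     intersection = set(sentence_pair[0].lower().split()).intersection(set(sentence_pair[1].lower().split()))
--     diff1 = [x for x in sentence_pair[0].lower().split() if x not in intersection]
--     diff2 = [x for x in sentence_pair[1].lower().split() if x not in intersection]
--     if len(diff1)<1 and len(diff2)<1: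
--         return False
--     else:
--         return True
-- ===== SOURCE B (Python) =====
-- def _final_filter(sentence_pair):
--     if len(sentence_pair[0].split()) > 22 or len(sentence_pair[1].split()) > 22:
--         return False
--     a = sentence_pair[0].lower()
--     b = sentence_pair[1].lower()
--     if a in b or b in a:
--         return False
--     # one marker dict: 1 = word occurs in sentence 0, +2 = word occurs in sentence 1
--     seen = {}
--     for w in a.split():
--         seen[w] = 1
--     for w in b.split():
--         v = seen.get(w, 0)
--         seen[w] = v if v >= 2 else v + 2
--     return any(v != 3 for v in seen.values())
-- ===== Notes on version B (the rewrite author's own statement) =====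
-- stated objective: alternative
-- what changed: Replaces A's intersection set and two filtered diff-list comprehensions with a single marker dictionary built in one pass over each sentence's lowercase words (1 = in first sentence, +2 = in second); the pair passes iff some marker differs from 3.
import Mathlib
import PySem

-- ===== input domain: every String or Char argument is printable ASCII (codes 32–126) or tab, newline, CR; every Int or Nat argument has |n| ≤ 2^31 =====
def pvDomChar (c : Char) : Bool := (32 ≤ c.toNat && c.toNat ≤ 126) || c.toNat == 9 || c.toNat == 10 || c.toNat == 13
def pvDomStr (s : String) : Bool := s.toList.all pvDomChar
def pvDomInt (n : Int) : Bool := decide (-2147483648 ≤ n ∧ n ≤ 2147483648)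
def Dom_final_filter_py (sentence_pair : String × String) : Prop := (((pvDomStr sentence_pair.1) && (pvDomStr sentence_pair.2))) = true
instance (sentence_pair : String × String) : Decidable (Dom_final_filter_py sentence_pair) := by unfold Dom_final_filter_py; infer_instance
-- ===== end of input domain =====

-- B keeps A's two guard clauses but replaces the intersection set and the two filtered diff
-- lists by ONE marker dictionary (1 = word in sentence 0, +2 = word in sentence 1), passing
-- iff some marker differs from 3 (alternative decomposition; same cost).

-- ===== PORT A =====
def final_filter_py (sentence_pair : String × String) : Bool :=
  if (PySem.Str.split₀ sentence_pair.1).length > 22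
      || (PySem.Str.split₀ sentence_pair.2).length > 22 then
    false
  else if PySem.Str.isIn (PySem.Str.lower sentence_pair.1) (PySem.Str.lower sentence_pair.2)
      || PySem.Str.isIn (PySem.Str.lower sentence_pair.2) (PySem.Str.lower sentence_pair.1) then
    false
  else
    if ((PySem.Str.split₀ (PySem.Str.lower sentence_pair.1)).filter
          (fun x => !(PySem.Set.contains (PySem.Set.inter
            (PySem.Set.ofList (PySem.Str.split₀ (PySem.Str.lower sentence_pair.1)))
            (PySem.Set.ofList (PySem.Str.split₀ (PySem.Str.lower sentence_pair.2)))) x))).length < 1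
        && ((PySem.Str.split₀ (PySem.Str.lower sentence_pair.2)).filter
          (fun x => !(PySem.Set.contains (PySem.Set.inter
            (PySem.Set.ofList (PySem.Str.split₀ (PySem.Str.lower sentence_pair.1)))
            (PySem.Set.ofList (PySem.Str.split₀ (PySem.Str.lower sentence_pair.2)))) x))).length < 1
    then false else true

-- ===== PORT B =====
def final_filter_py_alt (sentence_pair : String × String) : Bool :=
  if (PySem.Str.split₀ sentence_pair.1).length > 22
      || (PySem.Str.split₀ sentence_pair.2).length > 22 then
    false
  else if PySem.Str.isIn (PySem.Str.lower sentence_pair.1) (PySem.Str.lower sentence_pair.2)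
      || PySem.Str.isIn (PySem.Str.lower sentence_pair.2) (PySem.Str.lower sentence_pair.1) then
    false
  else
    -- seen = {}; for w in a.split(): seen[w] = 1
    -- for w in b.split(): v = seen.get(w, 0); seen[w] = v if v >= 2 else v + 2
    -- any(v != 3 for v in seen.values())
    (((PySem.Str.split₀ (PySem.Str.lower sentence_pair.2)).foldl
        (fun d w => d.insert w (if d.getD w 0 ≥ 2 then d.getD w 0 else d.getD w 0 + 2))
        ((PySem.Str.split₀ (PySem.Str.lower sentence_pair.1)).foldl
          (fun d w => d.insert w (1 : Int)) PySem.Dict.empty)).values.any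
      (fun v => v != 3))

-- ===== PRECONDITION & SPEC =====
def Spec_final_filter_py (sentence_pair : String × String) (out : Bool) : Prop := out = final_filter_py_alt sentence_pair
instance (sentence_pair : String × String) (out : Bool) : Decidable (Spec_final_filter_py sentence_pair out) := by unfold Spec_final_filter_py; infer_instance

-- ===== CLAIM (what is proved, stated in full; the proofs are below) =====
def Claim_equal_final_filter_py : Prop := ∀ (sentence_pair : String × String), Dom_final_filter_py sentence_pair → Spec_final_filter_py sentence_pair (final_filter_py sentence_pair)

-- ===== LEMMAS AND PROOFS =====

-- a word list's filter against the intersection is empty iff each of its words is in both lists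
theorem filter_not_inter_eq_nil_iff (la l1 l2 : List String) :
    (la.filter (fun x =>
        !(PySem.Set.contains (PySem.Set.inter (PySem.Set.ofList l1) (PySem.Set.ofList l2)) x)) = [])
      ↔ ∀ x ∈ la, x ∈ l1 ∧ x ∈ l2 := by
  rw [List.filter_eq_nil_iff]
  constructor
  · intro h x hx
    have hc := h x hx
    simp only [Bool.not_eq_true', Bool.not_eq_false] at hc
    have hm := (PySem.Set.contains_iff _ _).mp hc
    rwa [PySem.Set.mem_inter, PySem.Set.mem_ofList, PySem.Set.mem_ofList] at hm
  · intro h x hx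
    simp only [Bool.not_eq_true', Bool.not_eq_false]
    exact (PySem.Set.contains_iff _ _).mpr
      ((PySem.Set.mem_inter _ _ _).mpr (by
        rw [PySem.Set.mem_ofList, PySem.Set.mem_ofList]; exact h x hx))

-- A's final block (both diff lists empty ↦ False, else True) as a word-set comparison
theorem diffs_vs_equal (l1 l2 : List String) :
    (if (l1.filter (fun x =>
          !(PySem.Set.contains (PySem.Set.inter (PySem.Set.ofList l1) (PySem.Set.ofList l2)) x))).length < 1
        && (l2.filter (fun x =>
          !(PySem.Set.contains (PySem.Set.inter (PySem.Set.ofList l1) (PySem.Set.ofList l2)) x))).length < 1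
      then false else true)
    = !(PySem.Set.equal (PySem.Set.ofList l1) (PySem.Set.ofList l2)) := by
  by_cases heq : PySem.Set.equal (PySem.Set.ofList l1) (PySem.Set.ofList l2) = true
  · have hmem : ∀ x, x ∈ l1 ↔ x ∈ l2 := by
      intro x
      have := (PySem.Set.equal_iff _ _).mp heq x
      rwa [PySem.Set.mem_ofList, PySem.Set.mem_ofList] at this
    have h1 := (filter_not_inter_eq_nil_iff l1 l1 l2).mpr (fun x hx => ⟨hx, (hmem x).mp hx⟩)
    have h2 := (filter_not_inter_eq_nil_iff l2 l1 l2).mpr (fun x hx => ⟨(hmem x).mpr hx, hx⟩)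
    rw [h1, h2, heq]
    simp
  · have hnc : ¬ ((l1.filter (fun x =>
          !(PySem.Set.contains (PySem.Set.inter (PySem.Set.ofList l1) (PySem.Set.ofList l2)) x))).length < 1
        ∧ (l2.filter (fun x =>
          !(PySem.Set.contains (PySem.Set.inter (PySem.Set.ofList l1) (PySem.Set.ofList l2)) x))).length < 1) := by
      rintro ⟨h1, h2⟩
      rw [Nat.lt_one_iff, List.length_eq_zero_iff] at h1 h2
      have e1 := (filter_not_inter_eq_nil_iff l1 l1 l2).mp h1
      have e2 := (filter_not_inter_eq_nil_iff l2 l1 l2).mp h2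
      exact heq ((PySem.Set.equal_iff _ _).mpr (fun x => by
        rw [PySem.Set.mem_ofList, PySem.Set.mem_ofList]
        exact ⟨fun h => (e1 x h).2, fun h => (e2 x h).1⟩))
    simp only [Bool.not_eq_true] at heq
    rw [if_neg (by simpa using hnc), heq]
    rfl

-- value reached by B's first loop
theorem getD_mark_one (l : List String) (d : PySem.Dict String Int) (w : String) :
    ((l.foldl (fun d w => d.insert w (1 : Int)) d).getD w 0)
      = if w ∈ l then 1 else d.getD w 0 := by
  induction l generalizing d with
  | nil => simp
  | cons y ys ih =>
    simp only [List.foldl_cons, ih, PySem.Dict.getD_insert, List.mem_cons]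
    by_cases hys : w ∈ ys <;> by_cases hy : w = y <;> simp [hys, hy]

-- value reached by B's second loop (the marker update is idempotent on non-negative markers)
theorem getD_mark_two (l : List String) (d : PySem.Dict String Int)
    (hd : ∀ u, 0 ≤ d.getD u 0) (w : String) :
    ((l.foldl (fun d w => d.insert w
        (if d.getD w 0 ≥ 2 then d.getD w 0 else d.getD w 0 + 2)) d).getD w 0)
      = if w ∈ l then (if d.getD w 0 ≥ 2 then d.getD w 0 else d.getD w 0 + 2)
        else d.getD w 0 := by
  induction l generalizing d with
  | nil => simp
  | cons y ys ih =>
    have hd' : ∀ u, 0 ≤ (d.insert y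
        (if d.getD y 0 ≥ 2 then d.getD y 0 else d.getD y 0 + 2)).getD u 0 := by
      intro u
      rw [PySem.Dict.getD_insert]
      have := hd y
      have := hd u
      split <;> [skip; omega]
      split <;> omega
    simp only [List.foldl_cons, ih _ hd', PySem.Dict.getD_insert, List.mem_cons]
    have hw := hd w
    have hy := hd y
    by_cases hys : w ∈ ys <;> by_cases hyw : w = y
    · subst hyw; simp only [hys, if_true, or_true]; split_ifs <;> omega
    · simp only [hys, hyw, if_false, if_true, or_true]
    · subst hyw; simp only [hys, if_false, true_or, if_true]
    · simp only [hys, hyw, if_false, or_self]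

-- B's marker-dict block as the same word-set comparison
theorem markers_vs_equal (l1 l2 : List String) :
    ((l2.foldl (fun d w => d.insert w
        (if d.getD w 0 ≥ 2 then d.getD w 0 else d.getD w 0 + 2))
      (l1.foldl (fun d w => d.insert w (1 : Int)) PySem.Dict.empty)).values.any
        (fun v => v != 3))
    = !(PySem.Set.equal (PySem.Set.ofList l1) (PySem.Set.ofList l2)) := by
  set d1 := l1.foldl (fun d w => d.insert w (1 : Int)) PySem.Dict.empty with hd1
  set d2 := l2.foldl (fun d w => d.insert w
      (if d.getD w 0 ≥ 2 then d.getD w 0 else d.getD w 0 + 2)) d1 with hd2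
  have hnd1 : d1.keys.Nodup := PySem.Dict.nodup_keys_foldl_insert _ _ _ PySem.Dict.nodup_keys_empty
  have hnd2 : d2.keys.Nodup := PySem.Dict.nodup_keys_foldl_insert _ _ _ hnd1
  have hmemk : ∀ w, w ∈ d2.keys ↔ w ∈ l1 ∨ w ∈ l2 := by
    intro w
    rw [hd2, PySem.Dict.keys_foldl_insert, PySem.Set.mem_update,
        hd1, PySem.Dict.keys_foldl_insert, PySem.Set.mem_update, PySem.Dict.keys_empty]
    simp
  have hd1nn : ∀ u, 0 ≤ d1.getD u 0 := by
    intro u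
    rw [hd1, getD_mark_one, PySem.Dict.getD_empty]
    split <;> omega
  have hval : ∀ w, d2.getD w 0
      = if w ∈ l2 then (if w ∈ l1 then 3 else 2) else (if w ∈ l1 then 1 else 0) := by
    intro w
    rw [hd2, getD_mark_two _ _ hd1nn, hd1, getD_mark_one, PySem.Dict.getD_empty]
    by_cases h1 : w ∈ l1 <;> by_cases h2 : w ∈ l2 <;> simp [h1, h2]
  rw [PySem.Dict.values_eq_map_keys d2 hnd2 0, List.any_map]
  by_cases heq : PySem.Set.equal (PySem.Set.ofList l1) (PySem.Set.ofList l2) = true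
  · have hmem : ∀ x, x ∈ l1 ↔ x ∈ l2 := by
      intro x
      have := (PySem.Set.equal_iff _ _).mp heq x
      rwa [PySem.Set.mem_ofList, PySem.Set.mem_ofList] at this
    rw [heq]
    simp only [Bool.not_true, List.any_eq_false]
    intro w hw
    have h12 : w ∈ l1 ∧ w ∈ l2 := by
      rcases (hmemk w).mp hw with h | h
      · exact ⟨h, (hmem w).mp h⟩
      · exact ⟨(hmem w).mpr h, h⟩
    simp [Function.comp, hval w, h12.1, h12.2]
  · have : ¬ ∀ x, x ∈ l1 ↔ x ∈ l2 := by
      intro hall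
      exact heq ((PySem.Set.equal_iff _ _).mpr (fun x => by
        rw [PySem.Set.mem_ofList, PySem.Set.mem_ofList]; exact hall x))
    push Not at this
    obtain ⟨w, hw⟩ := this
    simp only [Bool.not_eq_true] at heq
    rw [heq, Bool.not_false, List.any_eq_true]
    refine ⟨w, (hmemk w).mpr (by tauto), ?_⟩
    simp only [Function.comp, hval w]
    rcases hw with ⟨h1, h2⟩ | ⟨h1, h2⟩ <;> simp [h1, h2]

-- ===== VERDICT (by name: the statement is the Claim_ definition above) =====
theorem final_filter_py_spec : Claim_equal_final_filter_py := by
  intro sp _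
  unfold Spec_final_filter_py final_filter_py final_filter_py_alt
  split
  · rfl
  · split
    · rfl
    · rw [diffs_vs_equal, markers_vs_equal]
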